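-- pv_equiv track=rewrite | github.com/Gonie-Gonie/pydocs | src/docscriptor/references.py | _split_bibtex_fields
-- ===== SOURCE A (Python) =====
-- def _split_bibtex_fields(source: str) -> list[str]:
--     parts: list[str] = []
--     depth = 0
--     current: list[str] = []
--
--     for char in source:
--         if char == "{":
--             depth += 1
--         elif char == "}":
--             depth = max(depth - 1, 0)
--
--         if char == "," and depth == 0:
--             part = "".join(current).strip()
--             if part:
--                 parts.append(part)
--             current = []
--             continue
--         current.append(char)
--
--     tail = "".join(current).strip()
--     if tail:
--         parts.append(tail)
--     return parts
-- ===== SOURCE B (Python) =====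
-- def _split_bibtex_fields(source: str) -> list[str]:
--     # Pass 1: find top-level comma boundaries, recording raw slices.
--     raw: list[str] = []
--     start = 0
--     depth = 0
--     for i, ch in enumerate(source):
--         if ch == "{":
--             depth += 1
--         elif ch == "}":
--             depth = max(depth - 1, 0)
--         elif ch == "," and depth == 0:
--             raw.append(source[start:i])
--             start = i + 1
--     raw.append(source[start:])
--     # Pass 2: strip each raw segment and keep the non-empty ones.
--     return [t for t in (seg.strip() for seg in raw) if t]
-- ===== Notes on version B (the rewrite author's own statement) =====
-- stated objective: alternative
-- what changed: Replaces A's single pass that grows a character buffer and emits cleaned parts inline with a two-pass find-then-clean decomposition: pass 1 records raw slices source[start:i] at top-level commas via enumerate and index tracking, pass 2 strips each raw segment and filters out empties.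
import Mathlib
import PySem

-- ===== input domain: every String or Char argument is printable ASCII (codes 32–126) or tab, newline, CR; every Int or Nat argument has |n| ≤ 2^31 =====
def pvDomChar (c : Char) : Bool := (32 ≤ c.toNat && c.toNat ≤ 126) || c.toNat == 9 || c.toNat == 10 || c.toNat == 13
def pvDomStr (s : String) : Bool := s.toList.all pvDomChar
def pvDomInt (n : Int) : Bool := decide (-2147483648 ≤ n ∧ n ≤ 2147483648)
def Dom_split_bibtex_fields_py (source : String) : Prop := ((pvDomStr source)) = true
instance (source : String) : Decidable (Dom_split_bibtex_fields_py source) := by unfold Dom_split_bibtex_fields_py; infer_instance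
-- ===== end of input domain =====

-- B splits boundary-finding (top-level comma indices -> raw slices) from stripping/filtering
-- into two separate passes, instead of A's single pass growing a char buffer; objective: alternative.


-- ===== PORT A =====
-- state = (parts, depth, current): literal transcription of A's for-loop body
def pvAStep (st : List String × Int × List Char) (c : Char) : List String × Int × List Char :=
  let parts := st.1
  let depth := st.2.1
  let current := st.2.2
  let depth := if c = '{' then depth + 1 else if c = '}' then max (depth - 1) 0 else depth
  if c = ',' ∧ depth = 0 then
    let part := PySem.Chars.strip current
    (if part ≠ [] then parts ++ [String.ofList part] else parts, depth, [])
  else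
    (parts, depth, current ++ [c])

def split_bibtex_fields_py (source : String) : List String :=
  let st := source.toList.foldl pvAStep ([], 0, [])
  let tail := PySem.Chars.strip st.2.2
  if tail ≠ [] then st.1 ++ [String.ofList tail] else st.1

-- ===== PORT B =====
-- pass-1 state = (raw, start, depth); raw collects the slices source[start:i] cut at top-level commas
def pvBStep (src : List Char) (st : List (List Char) × Int × Int) (ic : Int × Char) :
    List (List Char) × Int × Int :=
  let raw := st.1
  let start := st.2.1
  let depth := st.2.2
  let i := ic.1
  let c := ic.2
  if c = '{' then (raw, start, depth + 1)
  else if c = '}' then (raw, start, max (depth - 1) 0)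
  else if c = ',' ∧ depth = 0 then (raw ++ [PySem.List.slice src (some start) (some i)], i + 1, depth)
  else (raw, start, depth)

-- pass 2: seg.strip(), kept when non-empty
def pvClean (seg : List Char) : Option String :=
  let t := PySem.Chars.strip seg
  if t = [] then none else some (String.ofList t)

def split_bibtex_fields_py_alt (source : String) : List String :=
  let src := source.toList
  let st := (PySem.List.enumerate src).foldl (pvBStep src) ([], 0, 0)
  let raw := st.1 ++ [PySem.List.slice src (some st.2.1) none]
  raw.filterMap pvClean

-- ===== PRECONDITION & SPEC =====
def Spec_split_bibtex_fields_py (source : String) (out : List String) : Prop := out = split_bibtex_fields_py_alt source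
instance (source : String) (out : List String) : Decidable (Spec_split_bibtex_fields_py source out) := by unfold Spec_split_bibtex_fields_py; infer_instance

-- ===== CLAIM (what is proved, stated in full; the proofs are below) =====
def Claim_equal_split_bibtex_fields_py : Prop := ∀ (source : String), Dom_split_bibtex_fields_py source → Spec_split_bibtex_fields_py source (split_bibtex_fields_py source)

-- ===== LEMMAS AND PROOFS =====

-- reference decomposition: the raw top-level-comma segments of cs, starting at brace depth d
def pvSegs : List Char → Int → List (List Char)
  | [], _ => [[]]
  | c :: cs, d =>
    if c = ',' ∧ d = 0 then [] :: pvSegs cs d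
    else
      match pvSegs cs (if c = '{' then d + 1 else if c = '}' then max (d - 1) 0 else d) with
      | [] => [[c]]
      | s :: r => (c :: s) :: r

-- prepend x onto the first segment
def pvPrep (x : List Char) : List (List Char) → List (List Char)
  | [] => [x]
  | s :: r => (x ++ s) :: r

theorem pvSegs_ne_nil (cs : List Char) (d : Int) : pvSegs cs d ≠ [] := by
  cases cs with
  | nil => simp [pvSegs]
  | cons c cs =>
    simp only [pvSegs]
    split
    · simp
    · split <;> simp

theorem pvPrep_nil_eq (l : List (List Char)) (h : l ≠ []) : pvPrep [] l = l := by
  cases l with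
  | nil => exact absurd rfl h
  | cons s r => simp [pvPrep]

theorem pvPrep_snoc (x : List Char) (c : Char) (l : List (List Char)) :
    pvPrep (x ++ [c]) l = pvPrep x (match l with | [] => [[c]] | s :: r => (c :: s) :: r) := by
  cases l <;> simp [pvPrep]

-- A's finish step
def pvFinA (st : List String × Int × List Char) : List String :=
  let tail := PySem.Chars.strip st.2.2
  if tail ≠ [] then st.1 ++ [String.ofList tail] else st.1

-- invariant of A's loop
theorem pvA_inv (cs : List Char) (parts : List String) (d : Int) (cur : List Char) :
    pvFinA (cs.foldl pvAStep (parts, d, cur))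
      = parts ++ (pvPrep cur (pvSegs cs d)).filterMap pvClean := by
  induction cs generalizing parts d cur with
  | nil =>
    simp only [List.foldl_nil, pvFinA, pvSegs, pvPrep, List.append_nil,
      List.filterMap_cons, List.filterMap_nil, pvClean]
    split <;> simp_all
  | cons c cs ih =>
    rw [List.foldl_cons]
    set d' := if c = '{' then d + 1 else if c = '}' then max (d - 1) 0 else d with hd'
    by_cases hc : c = ',' ∧ d = 0
    · have hdd : d' = d := by rw [hd', hc.1]; simp
      have hstep : pvAStep (parts, d, cur) c =
          ((if PySem.Chars.strip cur ≠ [] then parts ++ [String.ofList (PySem.Chars.strip cur)] else parts), d, []) := by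
        simp only [pvAStep, ← hd', hdd]
        rw [if_pos hc]
      rw [hstep, ih]
      have hsegs : pvSegs (c :: cs) d = [] :: pvSegs cs d := by
        rw [pvSegs.eq_def]; simp [hc.1, hc.2]
      rw [hsegs, pvPrep_nil_eq _ (pvSegs_ne_nil cs d)]
      have hprep : pvPrep cur ([] :: pvSegs cs d) = cur :: pvSegs cs d := by simp [pvPrep]
      rw [hprep, List.filterMap_cons]
      simp only [pvClean]
      split <;> simp_all
    · have hc' : ¬ (c = ',' ∧ d' = 0) := by
        intro h; exact hc ⟨h.1, by have := h.2; rw [hd', h.1] at this; simpa using this⟩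
      have hstep : pvAStep (parts, d, cur) c = (parts, d', cur ++ [c]) := by
        simp only [pvAStep, ← hd']
        rw [if_neg hc']
      rw [hstep, ih]
      have hsegs : pvSegs (c :: cs) d =
          (match pvSegs cs d' with | [] => [[c]] | s :: r => (c :: s) :: r) := by
        rw [pvSegs.eq_def]; simp [hc, ← hd']
      rw [hsegs, ← pvPrep_snoc]

-- B's finish step
def pvFinB (src : List Char) (st : List (List Char) × Int × Int) : List String :=
  (st.1 ++ [PySem.List.slice src (some st.2.1) none]).filterMap pvClean

-- invariant of B's pass 1 (+ pass 2 applied at the end)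
theorem pvB_inv (rest pre : List Char) (src : List Char) (raw : List (List Char)) (s : Nat) (d : Int)
    (hsrc : src = pre ++ rest) (hs : s ≤ pre.length) :
    pvFinB src ((PySem.List.enumerate rest (pre.length : Int)).foldl (pvBStep src) (raw, (s : Int), d))
      = raw.filterMap pvClean ++ (pvPrep (pre.drop s) (pvSegs rest d)).filterMap pvClean := by
  induction rest generalizing pre raw s d with
  | nil =>
    simp only [PySem.List.enumerate_nil, List.foldl_nil, pvFinB]
    rw [PySem.List.slice_from_natCast]
    have : src.drop s = pre.drop s := by rw [hsrc]; simp
    rw [this]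
    simp [pvSegs, pvPrep, List.filterMap_append]
  | cons c rest ih =>
    rw [PySem.List.enumerate_cons, List.foldl_cons]
    have hlen1 : ((pre.length : Int) + 1) = (((pre ++ [c]).length : Nat) : Int) := by
      simp
    have hdrop : (pre ++ [c]).drop s = pre.drop s ++ [c] := by
      rw [List.drop_append_of_le_length hs]
    have hsrc' : src = (pre ++ [c]) ++ rest := by rw [hsrc]; simp
    have hs' : s ≤ (pre ++ [c]).length := by simp; omega
    by_cases h1 : c = '{'
    · have hstep : pvBStep src (raw, (s : Int), d) ((pre.length : Int), c) = (raw, (s : Int), d + 1) := by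
        simp [pvBStep, h1]
      rw [hstep, hlen1, ih (pre ++ [c]) raw s (d + 1) hsrc' hs']
      have hsegs : pvSegs (c :: rest) d =
          (match pvSegs rest (d + 1) with | [] => [[c]] | s :: r => (c :: s) :: r) := by
        rw [pvSegs.eq_def]; simp [h1]
      rw [hsegs, hdrop, pvPrep_snoc]
    · by_cases h2 : c = '}'
      · have hstep : pvBStep src (raw, (s : Int), d) ((pre.length : Int), c) = (raw, (s : Int), max (d - 1) 0) := by
          simp [pvBStep, h2]
        rw [hstep, hlen1, ih (pre ++ [c]) raw s (max (d - 1) 0) hsrc' hs']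
        have hsegs : pvSegs (c :: rest) d =
            (match pvSegs rest (max (d - 1) 0) with | [] => [[c]] | s :: r => (c :: s) :: r) := by
          rw [pvSegs.eq_def]; simp [h2]
        rw [hsegs, hdrop, pvPrep_snoc]
      · by_cases h3 : c = ',' ∧ d = 0
        · have hstep : pvBStep src (raw, (s : Int), d) ((pre.length : Int), c) =
              (raw ++ [PySem.List.slice src (some (s : Int)) (some (pre.length : Int))],
               (pre.length : Int) + 1, d) := by
            simp [pvBStep, h3.1, h3.2]
          have hslice : PySem.List.slice src (some (s : Int)) (some (pre.length : Int)) = pre.drop s := by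
            rw [PySem.List.slice_natCast, hsrc]
            rw [List.drop_append_of_le_length hs]
            have hl : (pre.drop s).length = pre.length - s := by simp
            rw [List.take_append_of_le_length (by omega)]
            exact List.take_of_length_le (by omega)
          rw [hstep, hslice, hlen1]
          rw [ih (pre ++ [c]) (raw ++ [pre.drop s]) ((pre ++ [c]).length) d hsrc' (le_refl _)]
          have hdrop' : (pre ++ [c]).drop ((pre ++ [c]).length) = [] := by
            apply List.drop_of_length_le; simp
          rw [hdrop', pvPrep_nil_eq _ (pvSegs_ne_nil rest d)]
          have hsegs : pvSegs (c :: rest) d = [] :: pvSegs rest d := by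
            rw [pvSegs.eq_def]; simp [h3.1, h3.2]
          rw [hsegs]
          have hprep : pvPrep (pre.drop s) ([] :: pvSegs rest d) = pre.drop s :: pvSegs rest d := by
            simp [pvPrep]
          rw [hprep, List.filterMap_append, List.filterMap_cons]
          cases hcl : pvClean (pre.drop s) <;> simp [hcl]
        · have hstep : pvBStep src (raw, (s : Int), d) ((pre.length : Int), c) = (raw, (s : Int), d) := by
            simp only [pvBStep, if_neg h1, if_neg h2, if_neg h3]
          have hd' : (if c = '{' then d + 1 else if c = '}' then max (d - 1) 0 else d) = d := by
            simp [h1, h2]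
          rw [hstep, hlen1, ih (pre ++ [c]) raw s d hsrc' hs']
          have hsegs : pvSegs (c :: rest) d =
              (match pvSegs rest d with | [] => [[c]] | s :: r => (c :: s) :: r) := by
            rw [pvSegs.eq_def]; simp [h3, hd']
          rw [hsegs, hdrop, pvPrep_snoc]

-- ===== VERDICT (by name: the statement is the Claim_ definition above) =====
theorem split_bibtex_fields_py_spec : Claim_equal_split_bibtex_fields_py := by
  intro source _
  unfold Spec_split_bibtex_fields_py split_bibtex_fields_py split_bibtex_fields_py_alt
  have hA := pvA_inv source.toList [] 0 []
  have hB := pvB_inv source.toList [] source.toList [] 0 0 (by simp) (by simp)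
  simp only [pvFinA] at hA
  simp only [pvFinB] at hB
  simp only [List.length_nil, Nat.cast_zero, List.drop_nil, List.filterMap_nil,
    List.nil_append] at hA hB
  rw [hA, hB]
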